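-- pv_equiv track=rewrite | github.com/JHL-HUST/AdvNMT-WSLS | attacker/Attacker.py | generate_statetags
-- ===== SOURCE A (Python) =====
-- def generate_statetags(replace_word_list, statueTags):
--     #statusTags -> int->bool
--     rep_list_buf = replace_word_list.copy()
--     idxs_sum = []
--     for alist in replace_word_list:
--         idxs_sum.append(alist[0])
--
--     for x in statueTags:
--         if x not in idxs_sum:
--             statueTags[x] = False
--         else:
--             statueTags[x] = True
--     return statueTags
-- ===== SOURCE B (Python) =====
-- def generate_statetags(replace_word_list, statueTags):
--     # scatter: reset every key to False, then mark heads that are existing keys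
--     for k in statueTags:
--         statueTags[k] = False
--     for alist in replace_word_list:
--         if alist[0] in statueTags:
--             statueTags[alist[0]] = True
--     return statueTags
-- ===== Notes on version B (the rewrite author's own statement) =====
-- stated objective: faster
-- what changed: Inverts the traversal: instead of building a list of heads and testing each dict key for membership in that list (gather, O(k*m)), B resets all keys to False in one pass and then scatters True over the heads that are existing keys via dict lookups (O(k+m)).
import Mathlib
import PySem

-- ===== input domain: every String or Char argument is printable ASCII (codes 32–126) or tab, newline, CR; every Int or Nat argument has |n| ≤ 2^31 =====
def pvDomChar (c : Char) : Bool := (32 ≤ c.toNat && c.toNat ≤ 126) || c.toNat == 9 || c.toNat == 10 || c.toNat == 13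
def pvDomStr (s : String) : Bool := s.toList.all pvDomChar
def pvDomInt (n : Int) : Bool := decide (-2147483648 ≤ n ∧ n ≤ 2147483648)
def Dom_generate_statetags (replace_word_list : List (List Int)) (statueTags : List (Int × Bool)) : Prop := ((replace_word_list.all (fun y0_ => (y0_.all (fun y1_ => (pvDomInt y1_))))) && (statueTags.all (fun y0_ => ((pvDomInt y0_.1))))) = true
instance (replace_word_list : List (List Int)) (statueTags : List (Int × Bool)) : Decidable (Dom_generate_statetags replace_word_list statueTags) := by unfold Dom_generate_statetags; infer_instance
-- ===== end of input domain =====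

-- B replaces A's gather (scan dict keys, test membership in a list of heads) by a scatter
-- (reset all keys to False, then mark heads that are existing keys): simpler, no index list.
-- Both A and B mutate statueTags in place in Python; the equivalence proved here is about the
-- return value (which is the mutated dict itself).

-- ===== PORT A =====
def generate_statetags (replace_word_list : List (List Int)) (statueTags : List (Int × Bool)) : List (Int × Bool) :=
  -- idxs_sum: append alist[0] for each alist (alist[0] via pyGet?; the .getD 0 is only
  -- reached outside Pre_, where the Python raises IndexError)
  let idxs_sum : List Int :=
    replace_word_list.foldl (fun acc alist => acc ++ [(PySem.List.pyGet? alist 0).getD 0]) []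
  let d : PySem.Dict Int Bool := PySem.Dict.mk statueTags
  (d.keys.foldl
    (fun d x => if !(idxs_sum.contains x) then d.insert x false else d.insert x true) d).items

-- ===== PORT B =====
def generate_statetags_alt (replace_word_list : List (List Int)) (statueTags : List (Int × Bool)) : List (Int × Bool) :=
  let d0 : PySem.Dict Int Bool := PySem.Dict.mk statueTags
  let d1 := d0.keys.foldl (fun d k => d.insert k false) d0
  let d2 := replace_word_list.foldl
    (fun d alist =>
      let k := (PySem.List.pyGet? alist 0).getD 0   -- alist[0]; default only reached outside Pre_
      if d.contains k then d.insert k true else d) d1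
  d2.items

-- ===== PRECONDITION & SPEC =====
-- Pre_ excludes inputs containing an empty inner list, on which both Pythons raise IndexError at alist[0].
def Pre_generate_statetags (replace_word_list : List (List Int)) (statueTags : List (Int × Bool)) : Prop :=
  ∀ alist ∈ replace_word_list, alist ≠ []
instance (replace_word_list : List (List Int)) (statueTags : List (Int × Bool)) : Decidable (Pre_generate_statetags replace_word_list statueTags) := by unfold Pre_generate_statetags; infer_instance

def pvWitness_generate_statetags : List (List Int) × (List (Int × Bool)) :=
  ([[2, 9], [5]], [(1, true), (2, false), (3, true)])

def Spec_generate_statetags (replace_word_list : List (List Int)) (statueTags : List (Int × Bool)) (out : List (Int × Bool)) : Prop := out = generate_statetags_alt replace_word_list statueTags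
instance (replace_word_list : List (List Int)) (statueTags : List (Int × Bool)) (out : List (Int × Bool)) : Decidable (Spec_generate_statetags replace_word_list statueTags out) := by unfold Spec_generate_statetags; infer_instance

-- ===== CLAIM (what is proved, stated in full; the proofs are below) =====
def Claim_equal_generate_statetags : Prop := ∀ (replace_word_list : List (List Int)) (statueTags : List (Int × Bool)), Dom_generate_statetags replace_word_list statueTags → Pre_generate_statetags replace_word_list statueTags → Spec_generate_statetags replace_word_list statueTags (generate_statetags replace_word_list statueTags)

-- ===== LEMMAS AND PROOFS =====

-- the head key both ports extract from an inner list
def pvKey (alist : List Int) : Int := (PySem.List.pyGet? alist 0).getD 0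

-- A's append-loop builds exactly the map of pvKey
theorem pv_idxs_eq_map (l : List (List Int)) (acc : List Int) :
    l.foldl (fun acc alist => acc ++ [(PySem.List.pyGet? alist 0).getD 0]) acc = acc ++ l.map pvKey := by
  induction l generalizing acc with
  | nil => simp
  | cons a l ih => simp [List.foldl_cons, ih, pvKey]

-- a fold of key-determined inserts over keys that are all present overwrites in place
theorem pv_foldl_insert_items (ks : List Int) (f : Int → Bool) (d : PySem.Dict Int Bool)
    (h : ∀ x ∈ ks, d.contains x = true) :
    (ks.foldl (fun d x => d.insert x (f x)) d).items
      = d.items.map (fun p => if p.1 ∈ ks then (p.1, f p.1) else p) := by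
  induction ks generalizing d with
  | nil => simp
  | cons x ks ih =>
    have hx : d.contains x = true := h x (by simp)
    have h' : ∀ y ∈ ks, (d.insert x (f x)).contains y = true := by
      intro y hy
      rw [PySem.Dict.contains_insert]
      simp [h y (by simp [hy])]
    rw [List.foldl_cons, ih _ h', PySem.Dict.items_insert_of_contains _ _ hx, List.map_map]
    apply List.map_congr_left
    intro p _
    by_cases hpk : p.1 = x
    · by_cases hks : p.1 ∈ ks <;> simp [Function.comp, hpk, hks]
    · have hbe : (p.1 == x) = false := by simp [hpk]
      by_cases hks : p.1 ∈ ks <;> simp [Function.comp, hbe, hpk, hks]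

-- B's second loop: marking existing heads True rewrites exactly the matching items
theorem pv_foldl_mark_items (l : List (List Int)) (d : PySem.Dict Int Bool) :
    (l.foldl (fun d alist =>
        let k := (PySem.List.pyGet? alist 0).getD 0
        if d.contains k then d.insert k true else d) d).items
      = d.items.map (fun p => if p.1 ∈ l.map pvKey then (p.1, true) else p) := by
  induction l generalizing d with
  | nil => simp
  | cons a l ih =>
    rw [List.foldl_cons, ih]
    have hstep : ((fun (d : PySem.Dict Int Bool) (alist : List Int) =>
          let k := (PySem.List.pyGet? alist 0).getD 0
          if d.contains k then d.insert k true else d) d a).items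
        = d.items.map (fun p => if p.1 = pvKey a then (p.1, true) else p) := by
      show (if d.contains (pvKey a) then d.insert (pvKey a) true else d).items = _
      cases hc : d.contains (pvKey a) with
      | true =>
        rw [if_pos rfl, PySem.Dict.items_insert_of_contains _ _ hc]
        apply List.map_congr_left
        intro p _
        by_cases hpk : p.1 = pvKey a
        · simp [hpk]
        · have hbe : (p.1 == pvKey a) = false := by simp [hpk]
          simp [hbe, hpk]
      | false =>
        rw [if_neg (by simp [hc])]
        have hnone : ∀ p ∈ d.items, ¬ p.1 = pvKey a := by
          intro p hp hpk
          have : d.contains p.1 = true := by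
            rw [PySem.Dict.contains_iff_mem_keys]
            exact PySem.Dict.mem_keys_of_mem_items _ hp
          rw [hpk, hc] at this
          exact Bool.false_ne_true this
        conv_lhs => rw [← List.map_id d.items]
        apply List.map_congr_left
        intro p hp
        simp [hnone p hp]
    rw [hstep, List.map_map]
    apply List.map_congr_left
    intro p _
    by_cases hpk : p.1 = pvKey a
    · by_cases hl : p.1 ∈ l.map pvKey <;> simp [Function.comp, hpk, hl]
    · by_cases hl : p.1 ∈ l.map pvKey <;> simp [Function.comp, hpk, hl]

-- each port, characterised: every key is retagged by membership of the heads list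
theorem pv_A_items (rwl : List (List Int)) (st : List (Int × Bool)) :
    generate_statetags rwl st = st.map (fun p => (p.1, (rwl.map pvKey).contains p.1)) := by
  show (List.foldl
      (fun d x => if !((rwl.foldl (fun acc alist => acc ++ [(PySem.List.pyGet? alist 0).getD 0]) []).contains x)
        then d.insert x false else d.insert x true)
      (PySem.Dict.mk st) (PySem.Dict.mk st).keys).items = _
  rw [pv_idxs_eq_map, List.nil_append]
  have hb : (fun (d : PySem.Dict Int Bool) (x : Int) =>
      if !((rwl.map pvKey).contains x) then d.insert x false else d.insert x true)
      = fun d x => d.insert x ((rwl.map pvKey).contains x) := by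
    funext d x
    cases hc : (rwl.map pvKey).contains x with
    | true => simp [hc]
    | false => simp [hc]
  rw [hb, pv_foldl_insert_items _ _ _ (by
    intro x hx
    rwa [PySem.Dict.contains_iff_mem_keys])]
  have hitems : (PySem.Dict.mk st).items = st := rfl
  have hkeys : (PySem.Dict.mk st).keys = st.map Prod.fst := rfl
  rw [hitems, hkeys]
  apply List.map_congr_left
  intro p hp
  have hmem : p.1 ∈ st.map Prod.fst := List.mem_map_of_mem hp
  simp [hmem]

theorem pv_B_items (rwl : List (List Int)) (st : List (Int × Bool)) :
    generate_statetags_alt rwl st = st.map (fun p => (p.1, (rwl.map pvKey).contains p.1)) := by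
  show (rwl.foldl
      (fun d alist =>
        let k := (PySem.List.pyGet? alist 0).getD 0
        if d.contains k then d.insert k true else d)
      ((PySem.Dict.mk st).keys.foldl (fun d k => d.insert k false) (PySem.Dict.mk st))).items = _
  rw [pv_foldl_mark_items]
  have h1 : ((PySem.Dict.mk st).keys.foldl (fun d k => d.insert k false) (PySem.Dict.mk st)).items
      = st.map (fun p => (p.1, false)) := by
    rw [pv_foldl_insert_items _ (fun _ => false) _ (by
      intro x hx
      rwa [PySem.Dict.contains_iff_mem_keys])]
    have hitems : (PySem.Dict.mk st).items = st := rfl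
    have hkeys : (PySem.Dict.mk st).keys = st.map Prod.fst := rfl
    rw [hitems, hkeys]
    apply List.map_congr_left
    intro p hp
    have hmem : p.1 ∈ st.map Prod.fst := List.mem_map_of_mem hp
    simp [hmem]
  rw [h1, List.map_map]
  apply List.map_congr_left
  intro p _
  by_cases hl : p.1 ∈ rwl.map pvKey <;> simp [Function.comp, hl]

-- ===== VERDICT (by name: the statement is the Claim_ definition above) =====
theorem generate_statetags_spec : Claim_equal_generate_statetags := by
  intro rwl st _ _
  unfold Spec_generate_statetags
  rw [pv_A_items, pv_B_items]
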